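-- pv_equiv track=rewrite | github.com/alpoor/reports | ec2_details_abacus.py | namedesc
-- ===== SOURCE A (Python) =====
-- def namedesc(tag):
--     str1 = ''
--     Name = ''
--     Description = ''
--     for x in tag:
--        if  x['Key'] == 'Name':
--           Name = x['Value']
--        if  x['Key'] == 'Description':
--           Description = x['Value']
--     return Name + '|' + Description
-- ===== SOURCE B (Python) =====
-- def namedesc(tag):
--     def last_value(key):
--         for x in reversed(tag):
--             if x['Key'] == key:
--                 return x['Value']
--         return ''
--     return last_value('Name') + '|' + last_value('Description')
-- ===== Notes on version B (the rewrite author's own statement) =====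
-- stated objective: alternative
-- what changed: Replaces the single forward pass maintaining two accumulators by two backward scans over reversed(tag), each returning the first matching tag's Value with an early exit (last occurrence wins by construction); 'Value' is read only on a match, as in A.
import Mathlib
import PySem

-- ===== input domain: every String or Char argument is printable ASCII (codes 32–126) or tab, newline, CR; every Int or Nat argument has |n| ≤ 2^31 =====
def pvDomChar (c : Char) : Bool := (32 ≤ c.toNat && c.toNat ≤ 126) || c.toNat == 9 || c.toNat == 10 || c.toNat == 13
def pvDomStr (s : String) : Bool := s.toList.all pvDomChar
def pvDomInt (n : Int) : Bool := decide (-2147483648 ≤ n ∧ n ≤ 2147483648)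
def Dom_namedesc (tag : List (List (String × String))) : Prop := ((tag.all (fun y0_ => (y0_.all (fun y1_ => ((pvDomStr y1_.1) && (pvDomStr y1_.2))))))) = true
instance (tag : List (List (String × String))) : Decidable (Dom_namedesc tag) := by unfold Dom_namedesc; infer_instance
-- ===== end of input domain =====

-- B replaces A's single forward pass with two accumulators by two backward scans that
-- return the first matching tag's Value (early exit); return values only (objective: alternative).

-- ===== PORT A =====
-- x['Key'] / x['Value'] are ported with getD ""; exact on Pre_namedesc, where the needed keys are present.
def namedesc (tag : List (List (String × String))) : String :=
  let p := tag.foldl (fun (s : String × String) x =>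
    let n := if (PySem.Dict.mk x).getD "Key" "" = "Name" then (PySem.Dict.mk x).getD "Value" "" else s.1
    let d := if (PySem.Dict.mk x).getD "Key" "" = "Description" then (PySem.Dict.mk x).getD "Value" "" else s.2
    (n, d)) ("", "")
  p.1 ++ "|" ++ p.2

-- ===== PORT B =====
-- B's inner loop over reversed(tag) with early return, as a structural recursion.
def lastValue (key : String) (l : List (List (String × String))) : String :=
  match l with
  | [] => ""
  | x :: xs => if (PySem.Dict.mk x).getD "Key" "" = key then (PySem.Dict.mk x).getD "Value" "" else lastValue key xs

def namedesc_alt (tag : List (List (String × String))) : String :=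
  lastValue "Name" tag.reverse ++ "|" ++ lastValue "Description" tag.reverse

-- ===== PRECONDITION & SPEC =====
-- Pre_ excludes exactly the inputs on which Python A raises KeyError: an element missing the
-- 'Key' key, or an element whose Key is 'Name' or 'Description' missing the 'Value' key.
def Pre_namedesc (tag : List (List (String × String))) : Prop :=
  ∀ x ∈ tag, (x.any (·.1 = "Key")) ∧
    (((PySem.Dict.mk x).getD "Key" "" = "Name" ∨ (PySem.Dict.mk x).getD "Key" "" = "Description")
      → x.any (·.1 = "Value"))
instance (tag : List (List (String × String))) : Decidable (Pre_namedesc tag) := by unfold Pre_namedesc; infer_instance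
def pvWitness_namedesc : (List (List (String × String))) :=
  [[("Key", "Name"), ("Value", "web-1")], [("Key", "Description"), ("Value", "frontend")]]
def Spec_namedesc (tag : List (List (String × String))) (out : String) : Prop := out = namedesc_alt tag
instance (tag : List (List (String × String))) (out : String) : Decidable (Spec_namedesc tag out) := by unfold Spec_namedesc; infer_instance

-- ===== CLAIM =====
def Claim_equal_namedesc : Prop := ∀ (tag : List (List (String × String))), Dom_namedesc tag → Pre_namedesc tag → Spec_namedesc tag (namedesc tag)

-- ===== LEMMAS AND PROOFS =====

-- A's pair-state fold splits into two independent scalar folds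
theorem pair_foldl_split (tag : List (List (String × String))) (a b : String) :
    tag.foldl (fun (s : String × String) x =>
      let n := if (PySem.Dict.mk x).getD "Key" "" = "Name" then (PySem.Dict.mk x).getD "Value" "" else s.1
      let d := if (PySem.Dict.mk x).getD "Key" "" = "Description" then (PySem.Dict.mk x).getD "Value" "" else s.2
      (n, d)) (a, b)
    = (tag.foldl (fun s x => if (PySem.Dict.mk x).getD "Key" "" = "Name" then (PySem.Dict.mk x).getD "Value" "" else s) a,
       tag.foldl (fun s x => if (PySem.Dict.mk x).getD "Key" "" = "Description" then (PySem.Dict.mk x).getD "Value" "" else s) b) := by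
  induction tag generalizing a b with
  | nil => rfl
  | cons x xs ih => simp only [List.foldl_cons]; exact ih _ _

-- a last-wins forward fold starting from "" equals a first-match scan of the reversed list
theorem foldl_eq_lastValue (key : String) (tag : List (List (String × String))) :
    tag.foldl (fun s x => if (PySem.Dict.mk x).getD "Key" "" = key then (PySem.Dict.mk x).getD "Value" "" else s) ""
    = lastValue key tag.reverse := by
  induction tag using List.reverseRecOn with
  | nil => rfl
  | append_singleton ys x ih =>
    rw [List.foldl_append, List.reverse_append]
    simp only [List.foldl_cons, List.foldl_nil, List.reverse_cons, List.reverse_nil,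
      List.nil_append, List.singleton_append, lastValue]
    by_cases h : (PySem.Dict.mk x).getD "Key" "" = key
    · simp [h]
    · simp [h, ih]

-- ===== VERDICT =====
theorem namedesc_spec : Claim_equal_namedesc := by
  intro tag _ _
  unfold Spec_namedesc namedesc namedesc_alt
  simp only [pair_foldl_split, foldl_eq_lastValue]
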